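-- pv_equiv track=rewrite | github.com/ercisjean-ai/immovision-import | sources/immoweb_browser_source.py | _looks_like_consent_gate
-- ===== SOURCE A (Python) =====
-- def _looks_like_consent_gate(normalized_html: str, title: str, body_excerpt: str) -> bool:
--     lowered_title = title.lower()
--     return any(
--         token in normalized_html or token in lowered_title or token in body_excerpt
--         for token in [
--             "cookie",
--             "consent",
--             "didomi",
--             "onetrust",
--             "tout accepter",
--             "accept all",
--             "privacy",
--         ]
--     )
-- ===== SOURCE B (Python) =====
-- _BY_FIRST = {}
-- for _t in ["cookie", "consent", "didomi", "onetrust",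
--            "tout accepter", "accept all", "privacy"]:
--     _BY_FIRST.setdefault(_t[0], []).append(_t)
--
--
-- def _looks_like_consent_gate(normalized_html: str, title: str, body_excerpt: str) -> bool:
--     # String-major character scan with a first-character dispatch table:
--     # at each position only tokens starting with that character are tried.
--     for s in (normalized_html, title.lower(), body_excerpt):
--         for i, ch in enumerate(s):
--             for t in _BY_FIRST.get(ch, ()):
--                 if s.startswith(t, i):
--                     return True
--     return False
-- ===== Notes on version B (the rewrite author's own statement) =====
-- stated objective: alternative
-- what changed: Replaces the token-major loop of 21 substring-search calls with a string-major character scan: one left-to-right pass over each string, using a dict keyed by first character so only tokens starting with the current character are tried, with early return on the first hit.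
import Mathlib
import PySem

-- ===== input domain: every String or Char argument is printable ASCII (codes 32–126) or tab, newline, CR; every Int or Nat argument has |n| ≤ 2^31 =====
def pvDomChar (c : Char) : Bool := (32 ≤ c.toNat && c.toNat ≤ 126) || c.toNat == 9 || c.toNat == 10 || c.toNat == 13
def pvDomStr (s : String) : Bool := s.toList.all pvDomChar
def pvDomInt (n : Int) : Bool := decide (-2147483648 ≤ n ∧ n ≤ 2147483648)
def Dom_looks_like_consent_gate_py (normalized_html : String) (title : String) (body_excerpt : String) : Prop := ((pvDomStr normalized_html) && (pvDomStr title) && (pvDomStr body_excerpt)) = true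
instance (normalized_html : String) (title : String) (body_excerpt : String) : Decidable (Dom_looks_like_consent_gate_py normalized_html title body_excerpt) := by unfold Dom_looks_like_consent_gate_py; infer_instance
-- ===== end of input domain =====

-- B replaces A's token-major loop of 21 substring-search calls by a string-major
-- character scan with a first-character dispatch table (alternative decomposition).

-- ===== PORT A =====
def looks_like_consent_gate_py (normalized_html : String) (title : String) (body_excerpt : String) : Bool :=
  let lowered_title := PySem.Str.lower title
  [ "cookie", "consent", "didomi", "onetrust", "tout accepter", "accept all", "privacy"
  ].any (fun token =>
    PySem.Str.isIn token normalized_html || PySem.Str.isIn token lowered_title ||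
      PySem.Str.isIn token body_excerpt)

-- ===== PORT B =====
-- _BY_FIRST.get(ch, ()): the tokens whose first character is ch (tokens as char lists)
def tokensFor (c : Char) : List (List Char) :=
  if c = 'c' then [['c', 'o', 'o', 'k', 'i', 'e'], ['c', 'o', 'n', 's', 'e', 'n', 't']]
  else if c = 'd' then [['d', 'i', 'd', 'o', 'm', 'i']]
  else if c = 'o' then [['o', 'n', 'e', 't', 'r', 'u', 's', 't']]
  else if c = 't' then [['t', 'o', 'u', 't', ' ', 'a', 'c', 'c', 'e', 'p', 't', 'e', 'r']]
  else if c = 'a' then [['a', 'c', 'c', 'e', 'p', 't', ' ', 'a', 'l', 'l']]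
  else if c = 'p' then [['p', 'r', 'i', 'v', 'a', 'c', 'y']]
  else []

-- the inner two loops of Source B: scan positions left to right; at each position try
-- only the tokens dispatched on the current character (s.startswith(t, i)); early out.
def scanFrom : List Char → Bool
  | [] => false
  | c :: rest =>
      (tokensFor c).any (fun t => PySem.Chars.startswith (c :: rest) t) || scanFrom rest

def looks_like_consent_gate_py_alt (normalized_html : String) (title : String) (body_excerpt : String) : Bool :=
  scanFrom normalized_html.toList || scanFrom (PySem.Str.lower title).toList ||
    scanFrom body_excerpt.toList

-- ===== PRECONDITION & SPEC =====
def Spec_looks_like_consent_gate_py (normalized_html : String) (title : String) (body_excerpt : String) (out : Bool) : Prop := out = looks_like_consent_gate_py_alt normalized_html title body_excerpt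
instance (normalized_html : String) (title : String) (body_excerpt : String) (out : Bool) : Decidable (Spec_looks_like_consent_gate_py normalized_html title body_excerpt out) := by unfold Spec_looks_like_consent_gate_py; infer_instance

-- ===== CLAIM (what is proved, stated in full; the proofs are below) =====
def Claim_equal_looks_like_consent_gate_py : Prop := ∀ (normalized_html : String) (title : String) (body_excerpt : String), Dom_looks_like_consent_gate_py normalized_html title body_excerpt → Spec_looks_like_consent_gate_py normalized_html title body_excerpt (looks_like_consent_gate_py normalized_html title body_excerpt)

-- ===== LEMMAS AND PROOFS =====
def pvTokenLists : List (List Char) :=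
  [ ['c', 'o', 'o', 'k', 'i', 'e'], ['c', 'o', 'n', 's', 'e', 'n', 't'],
    ['d', 'i', 'd', 'o', 'm', 'i'], ['o', 'n', 'e', 't', 'r', 'u', 's', 't'],
    ['t', 'o', 'u', 't', ' ', 'a', 'c', 'c', 'e', 'p', 't', 'e', 'r'],
    ['a', 'c', 'c', 'e', 'p', 't', ' ', 'a', 'l', 'l'], ['p', 'r', 'i', 'v', 'a', 'c', 'y'] ]

lemma tokensFor_sub (c : Char) (t : List Char) (h : t ∈ tokensFor c) : t ∈ pvTokenLists := by
  unfold tokensFor at h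
  split_ifs at h <;> simp_all [pvTokenLists] <;> tauto

lemma mem_tokensFor (c : Char) (tl : List Char)
    (ht : c :: tl ∈ pvTokenLists) : c :: tl ∈ tokensFor c := by
  unfold pvTokenLists at ht
  simp only [List.mem_cons, List.not_mem_nil, or_false, List.cons.injEq] at ht
  rcases ht with ⟨hc, htl⟩ | ⟨hc, htl⟩ | ⟨hc, htl⟩ | ⟨hc, htl⟩ | ⟨hc, htl⟩ | ⟨hc, htl⟩ | ⟨hc, htl⟩ <;>
    subst hc <;> subst htl <;> decide

lemma scanFrom_iff (cs : List Char) :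
    scanFrom cs = true ↔ ∃ t ∈ pvTokenLists, t <:+: cs := by
  induction cs with
  | nil =>
    constructor
    · intro h; exact absurd h (by decide)
    · rintro ⟨t, ht, hinf⟩
      rw [List.infix_nil] at hinf
      subst hinf
      exact absurd ht (by decide)
  | cons c rest ih =>
    simp only [scanFrom, Bool.or_eq_true, List.any_eq_true, ih]
    constructor
    · rintro (⟨t, ht, hs⟩ | ⟨t, ht, hinf⟩)
      · exact ⟨t, tokensFor_sub c t ht, ((PySem.Chars.startswith_iff _ _).mp hs).isInfix⟩
      · exact ⟨t, ht, hinf.trans (List.suffix_cons c rest).isInfix⟩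
    · rintro ⟨t, ht, hinf⟩
      rw [List.infix_cons_iff] at hinf
      rcases hinf with hpre | hinf
      · left
        rcases t with _ | ⟨c', tl⟩
        · exact absurd ht (by decide)
        · have hpre2 := hpre
          obtain ⟨u, hu⟩ := hpre2
          rw [List.cons_append] at hu
          injection hu with hc _
          subst hc
          exact ⟨_, mem_tokensFor c' tl ht, (PySem.Chars.startswith_iff _ _).mpr hpre⟩
      · exact Or.inr ⟨t, ht, hinf⟩

lemma scanFrom_eq_any (cs : List Char) :
    scanFrom cs = pvTokenLists.any (fun t => PySem.Chars.isIn t cs) := by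
  rcases h : pvTokenLists.any (fun t => PySem.Chars.isIn t cs) with _ | _
  · rw [Bool.eq_false_iff]
    intro hs
    rcases (scanFrom_iff _).mp hs with ⟨t, ht, hinf⟩
    exact List.any_eq_true.not.mp (Bool.eq_false_iff.mp h)
      ⟨t, ht, (PySem.Chars.isIn_iff_infix _ _).mpr hinf⟩
  · rcases List.any_eq_true.mp h with ⟨t, ht, hin⟩
    exact (scanFrom_iff _).mpr ⟨t, ht, (PySem.Chars.isIn_iff_infix _ _).mp hin⟩

lemma any_or3 {α : Type} (l : List α) (p q r : α → Bool) :
    l.any (fun t => p t || q t || r t) = (l.any p || l.any q || l.any r) := by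
  induction l with
  | nil => simp
  | cons a l ih =>
    simp only [List.any_cons, ih]
    cases p a <;> cases q a <;> cases r a <;> simp

-- ===== VERDICT (by name: the statement is the Claim_ definition above) =====
theorem looks_like_consent_gate_py_spec : Claim_equal_looks_like_consent_gate_py := by
  intro h t b _
  unfold Spec_looks_like_consent_gate_py
  unfold looks_like_consent_gate_py looks_like_consent_gate_py_alt
  simp only [scanFrom_eq_any]
  rw [show ([ "cookie", "consent", "didomi", "onetrust", "tout accepter", "accept all",
        "privacy"] : List String) = pvTokenLists.map String.ofList from rfl]
  rw [List.any_map]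
  have hmk : ∀ (l : List Char) (s : String),
      PySem.Str.isIn (String.ofList l) s = PySem.Chars.isIn l s.toList := by simp
  simp only [Function.comp_def, hmk]
  exact any_or3 pvTokenLists
    (fun tok => PySem.Chars.isIn tok h.toList)
    (fun tok => PySem.Chars.isIn tok (PySem.Str.lower t).toList)
    (fun tok => PySem.Chars.isIn tok b.toList)
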